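-- pv_equiv track=rewrite | github.com/RIGIK93/PunnetSquare | main.py | create_haploids
-- ===== SOURCE A (Python) =====
-- def create_haploids(genes):
--   a = genes.pop(0)
--   result = [[a[0]], [a[1]]]
--   while len(genes) != 0:
--       first = genes.pop(0)
--
--       temp = []
--
--       for gene in result:
--           for b in first:
--               temp += [gene + [b]]
--
--       result = temp
--
--   return result
-- ===== SOURCE B (Python) =====
-- def create_haploids(genes):
--     a = genes.pop(0)
--     dims = [[a[0], a[1]]]
--     while genes:
--         dims.append(genes.pop(0))
--     total = 1
--     for d in dims:
--         total *= len(d)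
--     out = []
--     for i in range(total):
--         combo = []
--         for d in reversed(dims):
--             combo.insert(0, d[i % len(d)])
--             i //= len(d)
--         out.append(combo)
--     return out
-- ===== Notes on version B (the rewrite author's own statement) =====
-- stated objective: alternative
-- what changed: B enumerates combinations directly by decoding each index 0..total-1 as a mixed-radix number over the gene sizes (last gene fastest), instead of A's repeated regrow-the-whole-result-list expansion; B also mutates genes (drains it) exactly like A.
-- outside the precondition, e.g. on create_haploids([]): A raises IndexError, B raises IndexError; on create_haploids([['A']]): A raises IndexError, B raises IndexError
import Mathlib
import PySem

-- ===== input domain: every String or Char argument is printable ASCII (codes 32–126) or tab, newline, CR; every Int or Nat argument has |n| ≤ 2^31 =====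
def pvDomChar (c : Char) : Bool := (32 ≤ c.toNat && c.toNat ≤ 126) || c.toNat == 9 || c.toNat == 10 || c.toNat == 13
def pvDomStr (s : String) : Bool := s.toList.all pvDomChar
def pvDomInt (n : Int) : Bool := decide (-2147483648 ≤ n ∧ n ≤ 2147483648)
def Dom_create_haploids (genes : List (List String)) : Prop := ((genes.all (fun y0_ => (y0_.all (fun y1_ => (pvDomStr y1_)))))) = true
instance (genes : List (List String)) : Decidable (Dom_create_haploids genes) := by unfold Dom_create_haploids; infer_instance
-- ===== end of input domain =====

-- B decodes each output index as a mixed-radix number instead of A's repeated list expansion.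
-- Both Pythons MUTATE the argument (drain genes by pop(0)); the equivalence proved is about the return value.

-- ===== PORT A =====
-- the while loop: result := result expanded by the next popped gene (gene varies slowest, b fastest)
def createHaploidsLoopA (result : List (List String)) (genes : List (List String)) : List (List String) :=
  match genes with
  | [] => result
  | first :: rest =>
      createHaploidsLoopA (result.flatMap (fun gene => first.map (fun b => gene ++ [b]))) rest

-- a = genes.pop(0); result = [[a[0]],[a[1]]]; a[0]/a[1] raise IndexError unless a has ≥ 2 items
-- (Pre_ excludes those inputs; the port returns [] there)
def create_haploids (genes : List (List String)) : List (List String) :=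
  match genes with
  | (x :: y :: _) :: rest => createHaploidsLoopA [[x], [y]] rest
  | _ => []

-- ===== PORT B =====
-- for d in reversed(dims): combo.insert(0, d[i % len(d)]); i //= len(d)   (state = (i, combo))
def createHaploidsDecode (dims : List (List String)) (i : Nat) : List String :=
  (dims.foldr (fun d st => (st.1 / d.length, d.getD (st.1 % d.length) "" :: st.2)) (i, ([] : List String))).2

-- a = genes.pop(0); dims = [[a[0], a[1]]] ++ the drained rest (raising inputs return [] ; outside Pre_)
def create_haploids_alt (genes : List (List String)) : List (List String) :=
  if genes = [] then []
  else
    let a := genes.headI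
    if a.length < 2 then []
    else
      let dims : List (List String) := [a.getD 0 "", a.getD 1 ""] :: genes.tail
      let total : Nat := dims.foldl (fun p d => p * d.length) 1
      (List.range total).map (fun i => createHaploidsDecode dims i)

-- ===== PRECONDITION & SPEC =====
-- A raises IndexError when genes is empty (pop from empty list) or the first gene has < 2 alleles (a[1]);
-- Pre_ excludes exactly those inputs.
def Pre_create_haploids (genes : List (List String)) : Prop :=
  genes ≠ [] ∧ 2 ≤ genes.headI.length
instance (genes : List (List String)) : Decidable (Pre_create_haploids genes) := by
  unfold Pre_create_haploids; infer_instance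

def pvWitness_create_haploids : List (List String) := [["A", "a"], ["B", "b", "b'"]]

def Spec_create_haploids (genes : List (List String)) (out : List (List String)) : Prop := out = create_haploids_alt genes
instance (genes : List (List String)) (out : List (List String)) : Decidable (Spec_create_haploids genes out) := by unfold Spec_create_haploids; infer_instance

-- ===== CLAIM (what is proved, stated in full; the proofs are below) =====
def Claim_equal_create_haploids : Prop := ∀ (genes : List (List String)), Dom_create_haploids genes → Pre_create_haploids genes → Spec_create_haploids genes (create_haploids genes)

-- ===== LEMMAS AND PROOFS =====

-- the cartesian product in A's order: first gene slowest, last fastest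
def prodListCH : List (List String) → List (List String)
  | [] => [[]]
  | d :: ds => d.flatMap (fun b => (prodListCH ds).map (b :: ·))

def radixCH (ds : List (List String)) : Nat := (ds.map List.length).prod

theorem loopA_eq (ds : List (List String)) :
    ∀ acc, createHaploidsLoopA acc ds =
      acc.flatMap (fun g => (prodListCH ds).map (fun t => g ++ t)) := by
  induction ds with
  | nil => intro acc; simp [createHaploidsLoopA, prodListCH]
  | cons d ds ih =>
      intro acc
      simp only [createHaploidsLoopA, ih, prodListCH]
      simp [List.flatMap_assoc, List.map_flatMap, List.flatMap_map, List.map_map,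
        Function.comp_def, List.append_assoc]

theorem foldr_fst (ds : List (List String)) (i : Nat) (c : List String) :
    (ds.foldr (fun d st => (st.1 / d.length, d.getD (st.1 % d.length) "" :: st.2)) (i, c)).1
      = i / radixCH ds := by
  induction ds generalizing c with
  | nil => simp [radixCH]
  | cons d ds ih =>
      simp only [List.foldr_cons, ih, radixCH, List.map_cons, List.prod_cons]
      rw [Nat.div_div_eq_div_mul, Nat.mul_comm]

theorem foldr_snd_mod (ds : List (List String)) (i : Nat) (c : List String) :
    (ds.foldr (fun d st => (st.1 / d.length, d.getD (st.1 % d.length) "" :: st.2)) (i, c)).2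
      = (ds.foldr (fun d st => (st.1 / d.length, d.getD (st.1 % d.length) "" :: st.2)) (i % radixCH ds, c)).2 := by
  induction ds generalizing i c with
  | nil => rfl
  | cons d ds ih =>
      simp only [List.foldr_cons, foldr_fst]
      have hrad : radixCH (d :: ds) = d.length * radixCH ds := by
        simp [radixCH, List.map_cons, List.prod_cons]
      rw [hrad]
      have h1 : i % (d.length * radixCH ds) % radixCH ds = i % radixCH ds :=
        Nat.mod_mod_of_dvd i ⟨d.length, Nat.mul_comm _ _⟩
      have h2 : i % (d.length * radixCH ds) / radixCH ds = i / radixCH ds % d.length := by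
        rw [Nat.mul_comm]
        exact Nat.mod_mul_right_div_self i (radixCH ds) d.length
      congr 1
      · rw [h2, Nat.mod_mod_of_dvd _ (dvd_refl d.length)]
      · rw [ih i c, ih (i % (d.length * radixCH ds)) c, h1]

theorem decode_mod (ds : List (List String)) (i : Nat) :
    createHaploidsDecode ds i = createHaploidsDecode ds (i % radixCH ds) := by
  unfold createHaploidsDecode; exact foldr_snd_mod ds i []

theorem decode_cons (d : List String) (ds : List (List String)) (i : Nat) :
    createHaploidsDecode (d :: ds) i
      = d.getD ((i / radixCH ds) % d.length) "" :: createHaploidsDecode ds i := by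
  unfold createHaploidsDecode
  simp only [List.foldr_cons, foldr_fst]

theorem getD_range (l : List String) :
    (List.range l.length).map (fun q => l.getD q "") = l := by
  apply List.ext_getElem
  · simp
  · intro k h1 h2
    simp [List.getD_eq_getElem?_getD, List.getElem?_eq_getElem h2]

theorem length_prodListCH (ds : List (List String)) :
    (prodListCH ds).length = radixCH ds := by
  induction ds with
  | nil => simp [prodListCH, radixCH]
  | cons d ds ih =>
      simp [prodListCH, radixCH, List.length_flatMap, ih,
        List.map_const', List.sum_replicate] at *

theorem range_mul_flatMap (a b : Nat) :
    List.range (a * b) = (List.range a).flatMap (fun q => (List.range b).map (fun r => q * b + r)) := by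
  induction a with
  | zero => simp
  | succ a ih =>
      rw [Nat.succ_mul, List.range_add, ih, List.range_succ, List.flatMap_append]
      simp [List.flatMap_cons]

theorem decode_range (ds : List (List String)) :
    (List.range (radixCH ds)).map (fun i => createHaploidsDecode ds i) = prodListCH ds := by
  induction ds with
  | nil =>
      simp [radixCH, prodListCH, createHaploidsDecode]
  | cons d ds ih =>
      have hrad : radixCH (d :: ds) = d.length * radixCH ds := by
        simp [radixCH]
      by_cases h0 : radixCH ds = 0
      · have hp : prodListCH ds = [] :=
          List.eq_nil_of_length_eq_zero (by rw [length_prodListCH, h0])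
        simp [hrad, h0, prodListCH, hp]
      · have hb : 0 < radixCH ds := Nat.pos_of_ne_zero h0
        rw [hrad, range_mul_flatMap, List.map_flatMap]
        simp only [prodListCH]
        rw [← ih]
        conv_rhs => rw [← getD_range d, List.flatMap_map]
        rw [List.flatMap, List.flatMap]
        congr 1
        apply List.map_congr_left
        intro q hq
        have hq' : q < d.length := List.mem_range.mp hq
        simp only [List.map_map]
        apply List.map_congr_left
        intro r hr
        have hr' : r < radixCH ds := List.mem_range.mp hr
        simp only [Function.comp_apply]
        rw [decode_cons]
        have hdiv : (q * radixCH ds + r) / radixCH ds = q := by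
          rw [Nat.add_comm, Nat.add_mul_div_right _ _ hb, Nat.div_eq_of_lt hr']
          omega
        have hmod : (q * radixCH ds + r) % radixCH ds = r := by
          rw [Nat.add_comm, Nat.add_mul_mod_self_right, Nat.mod_eq_of_lt hr']
        rw [hdiv, Nat.mod_eq_of_lt hq', decode_mod _ (q * radixCH ds + r), hmod]

theorem foldl_mul_len (ds : List (List String)) (a : Nat) :
    ds.foldl (fun p d => p * d.length) a = a * radixCH ds := by
  induction ds generalizing a with
  | nil => simp [radixCH]
  | cons d ds ih => simp [List.foldl_cons, ih, radixCH, Nat.mul_assoc]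

-- ===== VERDICT (by name: the statement is the Claim_ definition above) =====
theorem create_haploids_spec : Claim_equal_create_haploids := by
  intro genes _ hpre
  obtain ⟨hne, hlen⟩ := hpre
  unfold Spec_create_haploids
  match genes, hne with
  | (x :: y :: zs) :: rest, _ =>
      simp only [create_haploids, create_haploids_alt, List.headI, List.tail_cons,
        if_neg (by simp : ¬((x :: y :: zs) :: rest = [])),
        if_neg (by simp : ¬(x :: y :: zs).length < 2), List.getD_cons_zero,
        List.getD_cons_succ]
      rw [foldl_mul_len, one_mul, decode_range, loopA_eq]
      simp [prodListCH, List.flatMap_cons]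
  | (x :: []) :: rest, _ => simp [List.headI] at hlen
  | ([]) :: rest, _ => simp [List.headI] at hlen
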